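-- pv_equiv track=rewrite | github.com/ayukyo/alltoolkit | Python/de_bruijn_utils/de_bruijn.py | find_substring_position
-- ===== SOURCE A (Python) =====
-- def find_substring_position(sequence: str, target: str) -> int:
--     """
--     Find the first position of a target substring in the cyclic De Bruijn sequence.
--
--     Args:
--         sequence: The De Bruijn sequence
--         target: The substring to find
--
--     Returns:
--         Position (0-indexed) of the substring, or -1 if not found
--
--     Examples:
--         >>> find_substring_position('00010111', '101')
--         3
--         >>> find_substring_position('00010111', '111')
--         5
--         >>> find_substring_position('00010111', '222')
--         -1
--     """
--     if not target:
--         return -1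
--
--     n = len(target)
--     if n > len(sequence):
--         return -1
--
--     extended = sequence + sequence[:n - 1]
--
--     for i in range(len(sequence)):
--         if extended[i:i + n] == target:
--             return i
--
--     return -1
-- ===== SOURCE B (Python) =====
-- def find_substring_position(sequence: str, target: str) -> int:
--     # Rabin-Karp: slide a rolling polynomial hash over the cyclically extended
--     # sequence and compare characters only when the fingerprints collide.
--     n = len(target)
--     if n == 0 or n > len(sequence):
--         return -1
--     MOD = 2305843009213693951  # 2**61 - 1
--     BASE = 1114112
--     ht = 0
--     for c in target:
--         ht = (ht * BASE + ord(c)) % MOD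
--     extended = sequence + sequence[:n - 1]
--     h = 0
--     for c in extended[:n]:
--         h = (h * BASE + ord(c)) % MOD
--     top = pow(BASE, n - 1, MOD)
--     for i in range(len(sequence)):
--         if h == ht and extended[i:i + n] == target:
--             return i
--         if i + n < len(extended):
--             h = ((h - ord(extended[i]) * top) * BASE + ord(extended[i + n])) % MOD
--     return -1
-- ===== Notes on version B (the rewrite author's own statement) =====
-- stated objective: faster
-- what changed: Replaces A's per-position slice comparison with a Rabin-Karp rolling polynomial hash (mod 2^61-1) over the extended sequence, comparing characters only when the fingerprints collide.
import Mathlib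
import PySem

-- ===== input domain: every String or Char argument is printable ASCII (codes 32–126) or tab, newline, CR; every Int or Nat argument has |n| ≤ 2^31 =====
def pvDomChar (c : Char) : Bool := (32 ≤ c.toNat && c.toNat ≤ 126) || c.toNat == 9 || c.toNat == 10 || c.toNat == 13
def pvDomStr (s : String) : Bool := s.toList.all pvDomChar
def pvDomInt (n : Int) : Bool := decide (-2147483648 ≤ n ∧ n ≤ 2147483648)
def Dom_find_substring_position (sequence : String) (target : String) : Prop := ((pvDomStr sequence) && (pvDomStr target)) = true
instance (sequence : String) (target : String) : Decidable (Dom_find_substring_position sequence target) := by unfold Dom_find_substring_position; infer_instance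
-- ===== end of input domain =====

-- B replaces A's per-position slice comparison by a Rabin–Karp rolling hash (mod 2^61-1) over the
-- extended sequence, comparing characters only on a fingerprint hit: an alternative algorithm, same value.

-- ===== PORT A =====
-- A's 'for i in range(len(sequence)): if extended[i:i+n] == target: return i' as structural recursion on i
def pvLoopA (ext tgt : List Char) (n L i : Nat) : Int :=
  if _h : i < L then
    if PySem.List.slice ext (some (i : Int)) (some ((i : Int) + (n : Int))) = tgt then (i : Int)
    else pvLoopA ext tgt n L (i + 1)
  else -1
termination_by L - i

def find_substring_position (sequence : String) (target : String) : Int :=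
  let s := sequence.toList
  let t := target.toList
  if t = [] then -1
  else
    let n := t.length
    if n > s.length then -1
    else
      let extended := s ++ PySem.List.slice s none (some ((n : Int) - 1))
      pvLoopA extended t n s.length 0

-- ===== PORT B =====
-- ht = (ht * BASE + ord(c)) % MOD, folded over a string
def pvHashStep (h : Int) (c : Char) : Int :=
  PySem.Int.mod (h * 1114112 + (c.toNat : Int)) 2305843009213693951

def pvHash (l : List Char) : Int := l.foldl pvHashStep 0

-- B's scan: on each i, fingerprint test then (only on a hit) the character comparison;
-- rolling update 'h = ((h - ord(extended[i])*top)*BASE + ord(extended[i+n])) % MOD' when i+n < len(extended)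
def pvLoopB (ext tgt : List Char) (ht top : Int) (n L i : Nat) (h : Int) : Int :=
  if _h : i < L then
    if h = ht ∧ PySem.List.slice ext (some (i : Int)) (some ((i : Int) + (n : Int))) = tgt then (i : Int)
    else
      let h' := if i + n < ext.length then
          PySem.Int.mod ((h - ((ext.getD i 'A').toNat : Int) * top) * 1114112
              + ((ext.getD (i + n) 'A').toNat : Int)) 2305843009213693951
        else h
      pvLoopB ext tgt ht top n L (i + 1) h'
  else -1
termination_by L - i

def find_substring_position_alt (sequence : String) (target : String) : Int :=
  let s := sequence.toList
  let t := target.toList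
  let n := t.length
  if n = 0 ∨ n > s.length then -1
  else
    let ht := pvHash t
    let extended := s ++ PySem.List.slice s none (some ((n : Int) - 1))
    let h0 := pvHash (PySem.List.slice extended none (some (n : Int)))   -- extended[:n]
    let top := PySem.Int.powMod 1114112 (n - 1) 2305843009213693951      -- pow(BASE, n-1, MOD)
    pvLoopB extended t ht top n s.length 0 h0

-- ===== PRECONDITION & SPEC =====
def Spec_find_substring_position (sequence : String) (target : String) (out : Int) : Prop := out = find_substring_position_alt sequence target
instance (sequence : String) (target : String) (out : Int) : Decidable (Spec_find_substring_position sequence target out) := by unfold Spec_find_substring_position; infer_instance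

-- ===== CLAIM (what is proved, stated in full; the proofs are below) =====
def Claim_equal_find_substring_position : Prop := ∀ (sequence : String) (target : String), Dom_find_substring_position sequence target → Spec_find_substring_position sequence target (find_substring_position sequence target)

-- ===== LEMMAS AND PROOFS =====

-- the exact (un-modded) polynomial value of a window
def pvPoly (l : List Char) : Int := l.foldl (fun h c => h * 1114112 + (c.toNat : Int)) 0

theorem pv_foldl_poly_shift (l : List Char) : ∀ a : Int,
    l.foldl (fun h c => h * 1114112 + (c.toNat : Int)) a = a * 1114112 ^ l.length + pvPoly l := by
  induction l with
  | nil => intro a; simp [pvPoly]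
  | cons c l ih =>
    intro a
    have h1 := ih (a * 1114112 + (c.toNat : Int))
    have h2 := ih ((0 : Int) * 1114112 + (c.toNat : Int))
    simp only [List.foldl_cons, pvPoly] at *
    rw [h1, h2]
    simp only [List.length_cons]
    ring

theorem pv_hash_eq_poly_mod (l : List Char) : ∀ a : Int,
    l.foldl pvHashStep (a % 2305843009213693951)
      = (l.foldl (fun h c => h * 1114112 + (c.toNat : Int)) a) % 2305843009213693951 := by
  induction l with
  | nil => intro a; simp
  | cons c l ih =>
    intro a
    simp only [List.foldl_cons, pvHashStep,
      PySem.Int.mod_eq_emod_of_pos (show (0:Int) < 2305843009213693951 by norm_num)]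
    have hmod : (a % 2305843009213693951 * 1114112 + (c.toNat : Int)) % 2305843009213693951
        = (a * 1114112 + (c.toNat : Int)) % 2305843009213693951 :=
      Int.ModEq.add_right (c.toNat : Int)
        (Int.ModEq.mul_right 1114112
          (show Int.ModEq 2305843009213693951 (a % 2305843009213693951) a from
            Int.emod_emod_of_dvd a dvd_rfl))
    rw [hmod]
    exact ih _

theorem pv_hash_eq (l : List Char) : pvHash l = pvPoly l % 2305843009213693951 := by
  have := pv_hash_eq_poly_mod l 0
  simpa [pvHash, pvPoly] using this

-- rolling update correctness: window (c :: m) → window (m ++ [d])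
theorem pv_roll (c d : Char) (m : List Char) :
    PySem.Int.mod ((pvHash (c :: m) - (c.toNat : Int) * PySem.Int.powMod 1114112 m.length 2305843009213693951) * 1114112
        + (d.toNat : Int)) 2305843009213693951 = pvHash (m ++ [d]) := by
  have hM : (0:Int) < 2305843009213693951 := by norm_num
  rw [PySem.Int.mod_eq_emod_of_pos hM, PySem.Int.powMod_eq_emod _ _ hM,
      pv_hash_eq (c :: m), pv_hash_eq (m ++ [d])]
  have hcons : pvPoly (c :: m) = (c.toNat : Int) * 1114112 ^ m.length + pvPoly m := by
    simpa [pvPoly] using pv_foldl_poly_shift m ((0 : Int) * 1114112 + (c.toNat : Int))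
  have happ : pvPoly (m ++ [d]) = pvPoly m * 1114112 + (d.toNat : Int) := by
    simp [pvPoly, List.foldl_append]
  rw [hcons, happ]
  have : ((((c.toNat : Int) * 1114112 ^ m.length + pvPoly m) % 2305843009213693951
        - (c.toNat : Int) * ((1114112:Int) ^ m.length % 2305843009213693951)) * 1114112
        + (d.toNat : Int))
      ≡ ((((c.toNat : Int) * 1114112 ^ m.length + pvPoly m)
        - (c.toNat : Int) * ((1114112:Int) ^ m.length)) * 1114112
        + (d.toNat : Int)) [ZMOD 2305843009213693951] := by
    apply Int.ModEq.add_right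
    apply Int.ModEq.mul_right
    apply Int.ModEq.sub
    · exact Int.emod_emod_of_dvd _ dvd_rfl
    · exact Int.ModEq.mul_left _ (Int.emod_emod_of_dvd _ dvd_rfl)
  calc ((((c.toNat : Int) * 1114112 ^ m.length + pvPoly m) % 2305843009213693951
        - (c.toNat : Int) * ((1114112:Int) ^ m.length % 2305843009213693951)) * 1114112
        + (d.toNat : Int)) % 2305843009213693951
      = ((((c.toNat : Int) * 1114112 ^ m.length + pvPoly m)
        - (c.toNat : Int) * ((1114112:Int) ^ m.length)) * 1114112
        + (d.toNat : Int)) % 2305843009213693951 := this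
    _ = (pvPoly m * 1114112 + (d.toNat : Int)) % 2305843009213693951 := by ring_nf

-- B's loop computes exactly A's loop, given the rolling-hash invariant
theorem pv_loopB_eq_loopA (ext tgt : List Char) (n L : Nat) (_hn : tgt.length = n) (hpos : 0 < n)
    (hlen : ext.length + 1 = L + n) :
    ∀ k i h, L - i ≤ k → (i < L → h = pvHash ((ext.drop i).take n)) →
      pvLoopB ext tgt (pvHash tgt) (PySem.Int.powMod 1114112 (n - 1) 2305843009213693951) n L i h
        = pvLoopA ext tgt n L i := by
  intro k
  induction k with
  | zero =>
    intro i h hk _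
    rw [pvLoopB, pvLoopA, dif_neg (by omega), dif_neg (by omega)]
  | succ k ih =>
    intro i h hk hinv
    by_cases hi : i < L
    · rw [pvLoopB, pvLoopA, dif_pos hi, dif_pos hi]
      have hslice := PySem.List.slice_natCast_add ext i n
      have hwin : h = pvHash ((ext.drop i).take n) := hinv hi
      by_cases hs : PySem.List.slice ext (some (i : Int)) (some ((i : Int) + (n : Int))) = tgt
      · rw [if_pos hs, if_pos ⟨by rw [hwin, ← hs, hslice], hs⟩]
      · rw [if_neg hs, if_neg (by rintro ⟨_, h2⟩; exact hs h2)]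
        apply ih (i + 1) _ (by omega)
        intro hi1
        -- i + 1 < L, so i + n < ext.length and the rolling branch fires
        have hib : i + n < ext.length := by omega
        rw [if_pos hib]
        -- decompose windows
        have hilt : i < ext.length := by omega
        have hdrop : ext.drop i = ext[i] :: ext.drop (i + 1) := List.drop_eq_getElem_cons hilt
        have hlen1 : n - 1 < (ext.drop (i + 1)).length := by simp; omega
        have hgd : (ext.drop (i + 1))[n - 1]'hlen1 = ext[i + n] := by
          rw [List.getElem_drop]; congr 1; omega
        have hwtake : (ext.drop i).take n = ext[i] :: (ext.drop (i + 1)).take (n - 1) := by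
          rw [hdrop]
          conv_lhs => rw [show n = (n - 1) + 1 from by omega]
          rw [List.take_succ_cons]
        have hwtake' : (ext.drop (i + 1)).take n = (ext.drop (i + 1)).take (n - 1) ++ [ext[i + n]] := by
          rw [← hgd]
          conv_lhs => rw [show n = (n - 1) + 1 from by omega]
          exact List.take_succ_eq_append_getElem hlen1
        have hm : ((ext.drop (i + 1)).take (n - 1)).length = n - 1 := by simp; omega
        have hroll := pv_roll (ext[i]) (ext[i + n]) ((ext.drop (i + 1)).take (n - 1))
        rw [hm] at hroll
        rw [hwin, hwtake, List.getD_eq_getElem ext 'A' hilt, List.getD_eq_getElem ext 'A' hib,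
            hwtake', ← hroll]
    · rw [pvLoopB, pvLoopA, dif_neg hi, dif_neg hi]

-- ===== VERDICT (by name: the statement is the Claim_ definition above) =====
theorem find_substring_position_spec : Claim_equal_find_substring_position := by
  unfold Claim_equal_find_substring_position
  intro sequence target _hdom
  unfold Spec_find_substring_position find_substring_position find_substring_position_alt
  set s := sequence.toList with hs
  set t := target.toList with htdef
  by_cases h0 : t = []
  · simp [h0]
  · have hpos : 0 < t.length := List.length_pos_iff.mpr h0
    by_cases h1 : t.length > s.length
    · simp [h0, h1]
    · simp only [h0, h1, if_false, or_false]
      rw [if_neg (by omega)]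
      have hb : ((t.length : Int) - 1) = (((t.length - 1 : Nat)) : Int) := by omega
      have hslice : PySem.List.slice s none (some ((t.length : Int) - 1)) = s.take (t.length - 1) := by
        rw [hb, PySem.List.slice_to_natCast]
      have hextlen : (s ++ PySem.List.slice s none (some ((t.length : Int) - 1))).length + 1
          = s.length + t.length := by
        rw [hslice]; simp; omega
      symm
      rw [PySem.List.slice_to_natCast]
      exact pv_loopB_eq_loopA _ t t.length s.length rfl hpos hextlen s.length 0 _ (by omega)
        (fun _ => by rw [List.drop_zero])
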